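-- pv_equiv track=rewrite | github.com/dmswjd4117/algorithm | binary_search/수이어쓰기.py | more_than
-- ===== SOURCE A (Python) =====
-- def cal(N):
--     res = 0
--     leng = len(str(N))
--     for i in range(1, leng+1):
--         loc = 10 ** (i-1)
--         if i == leng:
--             res += i * (N - loc + 1)
--         else:
--             res += i * (9 * loc)
--
--     return res
--
-- def more_than(start, end, leng):
--     mid = (start+end)//2
--     mid_leng = cal(mid)
--
--     if start > end:
--         return start
--
--     if mid_leng == leng:
--         return mid
--     elif mid_leng < leng:
--         return more_than(mid+1, end, leng)
--     else:
--         return more_than(start, mid-1, leng)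
-- ===== SOURCE B (Python) =====
-- def cal(N):
--     d = len(str(N))
--     total = d * (N - 10 ** (d - 1) + 1)
--     for i in range(1, d):
--         total += 9 * i * 10 ** (i - 1)
--     return total
--
-- def more_than(start, end, leng):
--     while start <= end:
--         mid = (start + end) // 2
--         m = cal(mid)
--         if m == leng:
--             return mid
--         if m < leng:
--             start = mid + 1
--         else:
--             end = mid - 1
--     return start
-- ===== Notes on version B (the rewrite author's own statement) =====
-- stated objective: simpler
-- what changed: The recursive binary search becomes an iterative while-loop (recursion cases mapped to pointer updates, the start>end base case to the post-loop return), and cal's final digit-block term is pulled out of the loop so the loop body has no branch.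
import Mathlib
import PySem

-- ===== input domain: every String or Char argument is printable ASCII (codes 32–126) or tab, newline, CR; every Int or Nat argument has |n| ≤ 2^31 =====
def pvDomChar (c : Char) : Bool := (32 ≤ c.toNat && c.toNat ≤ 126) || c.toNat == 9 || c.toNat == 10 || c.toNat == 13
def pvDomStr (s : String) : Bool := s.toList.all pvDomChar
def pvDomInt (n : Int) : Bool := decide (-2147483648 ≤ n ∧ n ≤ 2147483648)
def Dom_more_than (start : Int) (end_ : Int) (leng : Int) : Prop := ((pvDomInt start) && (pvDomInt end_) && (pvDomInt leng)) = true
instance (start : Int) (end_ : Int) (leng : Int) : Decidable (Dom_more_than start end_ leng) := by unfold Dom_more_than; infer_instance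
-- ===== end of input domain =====

-- B replaces A's recursion by an iterative-style loop and splits cal's final digit-block
-- term out of the loop; objective: simpler (no speed claim).

-- ===== PORT A =====
def cal (N : Int) : Int :=
  let leng : Int := PySem.Str.len (PySem.Int.toStr N)
  (PySem.List.pyRange 1 (leng + 1) 1).foldl (fun res i =>
    let loc : Int := (10 : Int) ^ (i - 1).toNat
    if i == leng then res + i * (N - loc + 1) else res + i * (9 * loc)) 0

def more_than (start : Int) (end_ : Int) (leng : Int) : Int :=
  let mid := PySem.Int.floordiv (start + end_) 2
  let mid_leng := cal mid
  if _h : start > end_ then start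
  else if mid_leng == leng then mid
  else if mid_leng < leng then more_than (mid + 1) end_ leng
  else more_than start (mid - 1) leng
termination_by (end_ - start + 1).toNat
decreasing_by
  all_goals
    have hb := PySem.Int.floordiv_two_mid_bounds (lo := start) (hi := end_) (by omega)
    omega

-- ===== PORT B =====
def cal_alt (N : Int) : Int :=
  let d : Int := PySem.Str.len (PySem.Int.toStr N)
  let total : Int := d * (N - (10 : Int) ^ (d - 1).toNat + 1)
  (PySem.List.pyRange 1 d 1).foldl (fun total i =>
    total + 9 * i * (10 : Int) ^ (i - 1).toNat) total

-- the 'while start <= end' loop of Source B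
def mtLoop (start : Int) (end_ : Int) (leng : Int) : Int :=
  if _h : start ≤ end_ then
    let mid := PySem.Int.floordiv (start + end_) 2
    let m := cal_alt mid
    if m == leng then mid
    else if m < leng then mtLoop (mid + 1) end_ leng
    else mtLoop start (mid - 1) leng
  else start
termination_by (end_ - start + 1).toNat
decreasing_by
  all_goals
    have hb := PySem.Int.floordiv_two_mid_bounds (lo := start) (hi := end_) (by omega)
    omega

def more_than_alt (start : Int) (end_ : Int) (leng : Int) : Int :=
  mtLoop start end_ leng

-- ===== PRECONDITION & SPEC =====
def Spec_more_than (start : Int) (end_ : Int) (leng : Int) (out : Int) : Prop := out = more_than_alt start end_ leng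
instance (start : Int) (end_ : Int) (leng : Int) (out : Int) : Decidable (Spec_more_than start end_ leng out) := by unfold Spec_more_than; infer_instance

-- ===== CLAIM (what is proved, stated in full; the proofs are below) =====
def Claim_equal_more_than : Prop := ∀ (start : Int) (end_ : Int) (leng : Int), Dom_more_than start end_ leng → Spec_more_than start end_ leng (more_than start end_ leng)

-- ===== LEMMAS AND PROOFS =====

theorem cal_core (N d : Int) (hd0 : 0 ≤ d) :
    (PySem.List.pyRange 1 (d + 1) 1).foldl (fun res i =>
        if i == d then res + i * (N - (10 : Int) ^ (i - 1).toNat + 1)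
        else res + i * (9 * (10 : Int) ^ (i - 1).toNat)) 0
    = (PySem.List.pyRange 1 d 1).foldl (fun total i =>
        total + 9 * i * (10 : Int) ^ (i - 1).toNat)
        (d * (N - (10 : Int) ^ (d - 1).toNat + 1)) := by
  rcases eq_or_lt_of_le hd0 with h0 | h1
  · rw [PySem.List.pyRange_one_eq_nil (by omega), PySem.List.pyRange_one_eq_nil (by omega)]
    simp [← h0]
  · rw [PySem.List.pyRange_one_succ_right (by omega), List.foldl_append]
    simp only [List.foldl_cons, List.foldl_nil, BEq.rfl, if_pos]
    have hF : ((PySem.List.pyRange 1 d 1).foldl (fun res i =>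
          if i == d then res + i * (N - (10 : Int) ^ (i - 1).toNat + 1)
          else res + i * (9 * (10 : Int) ^ (i - 1).toNat)) 0)
        = (PySem.List.pyRange 1 d 1).foldl
            (fun res i => res + i * (9 * (10 : Int) ^ (i - 1).toNat)) 0 := by
      apply PySem.List.foldl_congr_mem
      intro acc x hx
      have hxd : x < d := (PySem.List.mem_pyRange_one.mp hx).2
      have hne : (x == d) = false := by simp; omega
      simp [hne]
    rw [hF, PySem.List.foldl_add, PySem.List.foldl_add]
    have hmap : (PySem.List.pyRange 1 d 1).map (fun i => i * (9 * (10 : Int) ^ (i - 1).toNat))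
        = (PySem.List.pyRange 1 d 1).map (fun i => 9 * i * (10 : Int) ^ (i - 1).toNat) := by
      apply List.map_congr_left; intro x _; ring
    rw [hmap]; ring

theorem cal_eq (N : Int) : cal N = cal_alt N := by
  have hd0 : 0 ≤ PySem.Str.len (PySem.Int.toStr N) := by
    rw [PySem.Str.len_eq]; positivity
  exact cal_core N (PySem.Str.len (PySem.Int.toStr N)) hd0

theorem more_than_eq_aux (leng : Int) : ∀ (n : Nat) (s e : Int),
    (e - s + 1).toNat ≤ n → more_than s e leng = mtLoop s e leng := by
  intro n
  induction n with
  | zero =>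
    intro s e h
    rw [more_than, mtLoop]
    have hgt : s > e := by omega
    simp [hgt, not_le.mpr hgt]
  | succ n ih =>
    intro s e h
    rw [more_than, mtLoop]
    by_cases hle : s ≤ e
    · have hb := PySem.Int.floordiv_two_mid_bounds (lo := s) (hi := e) hle
      simp only [not_lt.mpr hle, hle, dite_true, dite_false]
      rw [cal_eq]
      split_ifs with h1 h2
      · rfl
      · exact ih _ _ (by omega)
      · exact ih _ _ (by omega)
    · have hgt : s > e := by omega
      simp [hgt, not_le.mpr hgt]

theorem more_than_eq (s e leng : Int) : more_than s e leng = mtLoop s e leng :=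
  more_than_eq_aux leng (e - s + 1).toNat s e le_rfl

-- ===== VERDICT (by name: the statement is the Claim_ definition above) =====
theorem more_than_spec : Claim_equal_more_than := by
  intro start end_ leng _hdom
  unfold Spec_more_than more_than_alt
  exact more_than_eq start end_ leng
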